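-- pv_equiv track=rewrite | github.com/erotokritoscy/compiler-ISA-explorer | workflow.py | generate_valid_param_combinations
-- ===== SOURCE A (Python) =====
-- from itertools import chain, combinations
--
-- def generate_valid_param_combinations(params, conflicts=[]):
--     def valid(combo):
--         for conflict in conflicts:
--             if all(p in combo for p in conflict):
--                 return False
--         return True
--
--     combos = chain.from_iterable(combinations(params, r) for r in range(len(params) + 1))
--     return [list(c) for c in combos if valid(c)]
-- ===== SOURCE B (Python) =====
-- def generate_valid_param_combinations(params, conflicts=[]):
--     # Build subsets grouped by size with a right-to-left Pascal-style fold: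
--     # buckets[k] holds the size-k subsets of the processed suffix in
--     # index-lexicographic order (= itertools.combinations order).
--     buckets = [[[]]]
--     for p in reversed(params):
--         buckets = [buckets[0]] + [
--             [[p] + c for c in buckets[k - 1]]
--             + (buckets[k] if k < len(buckets) else [])
--             for k in range(1, len(buckets) + 1)
--         ]
--     return [
--         c
--         for bucket in buckets
--         for c in bucket
--         if not any(all(q in c for q in conf) for conf in conflicts)
--     ]
-- ===== Notes on version B (the rewrite author's own statement) =====
-- stated objective: alternative
-- what changed: Replaces the itertools chain-of-combinations powerset with a right-to-left Pascal-style fold that maintains size-bucketed subset lists (buckets[k] = size-k subsets of the suffix, in index-lexicographic order) and a single any/all filter, instead of per-size combination generation.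
import Mathlib
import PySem

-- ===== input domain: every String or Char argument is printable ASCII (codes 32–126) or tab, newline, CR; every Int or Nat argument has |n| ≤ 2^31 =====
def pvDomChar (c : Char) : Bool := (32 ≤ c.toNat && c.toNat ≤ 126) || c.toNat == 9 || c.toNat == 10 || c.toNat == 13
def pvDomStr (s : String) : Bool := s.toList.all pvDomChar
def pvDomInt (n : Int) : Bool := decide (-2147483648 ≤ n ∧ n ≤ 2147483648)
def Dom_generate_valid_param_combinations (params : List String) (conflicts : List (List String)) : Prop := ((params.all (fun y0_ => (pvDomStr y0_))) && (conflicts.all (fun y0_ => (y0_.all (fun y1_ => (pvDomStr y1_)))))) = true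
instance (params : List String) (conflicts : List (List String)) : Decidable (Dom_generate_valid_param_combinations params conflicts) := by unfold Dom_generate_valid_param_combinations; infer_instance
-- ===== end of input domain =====

-- B replaces the itertools powerset chain by a right-to-left Pascal-style fold that
-- builds the size-grouped subsets directly (objective: alternative, same cost).

-- ===== PORT A =====
-- itertools.combinations(xs, r): the size-r subsequences in index-lexicographic order
def pvCombinations (r : Nat) (xs : List String) : List (List String) :=
  match r, xs with
  | 0, _ => [[]]
  | _ + 1, [] => []
  | r + 1, x :: rest =>
      (pvCombinations r rest).map (fun c => x :: c) ++ pvCombinations (r + 1) rest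

-- A's inner `valid`: loop over conflicts, return False on the first fully-contained one
def pvValidA (conflicts : List (List String)) (combo : List String) : Bool :=
  match conflicts with
  | [] => true
  | conflict :: rest =>
      if conflict.all (fun p => combo.contains p) then false
      else pvValidA rest combo

def generate_valid_param_combinations (params : List String) (conflicts : List (List String)) : List (List String) :=
  let combos := (List.range (params.length + 1)).flatMap (fun r => pvCombinations r params)
  combos.filter (fun c => pvValidA conflicts c)

-- ===== PORT B =====
-- Source B's fold: buckets[k] = size-k subsets of the processed suffix, in combination order
def pvBuckets (params : List String) : List (List (List String)) :=
  match params with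
  | [] => [[[]]]
  | p :: rest =>
      let b := pvBuckets rest
      b.headD [] ::
        (List.range' 1 b.length).map (fun k =>
          ((b.getD (k - 1) []).map (fun c => p :: c)) ++
            (if k < b.length then b.getD k [] else []))

def generate_valid_param_combinations_alt (params : List String) (conflicts : List (List String)) : List (List String) :=
  (pvBuckets params).flatMap (fun bucket =>
    bucket.filter (fun c =>
      !(conflicts.any (fun conf => conf.all (fun q => c.contains q)))))

-- ===== PRECONDITION & SPEC =====
def Spec_generate_valid_param_combinations (params : List String) (conflicts : List (List String)) (out : List (List String)) : Prop := out = generate_valid_param_combinations_alt params conflicts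
instance (params : List String) (conflicts : List (List String)) (out : List (List String)) : Decidable (Spec_generate_valid_param_combinations params conflicts out) := by unfold Spec_generate_valid_param_combinations; infer_instance

-- ===== CLAIM (what is proved, stated in full; the proofs are below) =====
def Claim_equal_generate_valid_param_combinations : Prop := ∀ (params : List String) (conflicts : List (List String)), Dom_generate_valid_param_combinations params conflicts → Spec_generate_valid_param_combinations params conflicts (generate_valid_param_combinations params conflicts)

-- ===== LEMMAS AND PROOFS =====

theorem pvCombinations_eq_nil {r : Nat} {xs : List String} (h : xs.length < r) :
    pvCombinations r xs = [] := by
  induction xs generalizing r with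
  | nil => cases r with
    | zero => omega
    | succ r => rfl
  | cons x rest ih =>
      cases r with
      | zero => omega
      | succ r =>
          simp only [pvCombinations, List.append_eq_nil_iff, List.map_eq_nil_iff]
          constructor
          · exact ih (by simp at h; omega)
          · exact ih (by simp at h; omega)

theorem pvBuckets_eq (params : List String) :
    pvBuckets params =
      (List.range (params.length + 1)).map (fun r => pvCombinations r params) := by
  induction params with
  | nil => rfl
  | cons p rest ih =>
      have hlen : (pvBuckets rest).length = rest.length + 1 := by
        rw [ih]; simp
      show (pvBuckets rest).headD [] ::
          (List.range' 1 (pvBuckets rest).length).map (fun k =>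
            (((pvBuckets rest).getD (k - 1) []).map (fun c => p :: c)) ++
              (if k < (pvBuckets rest).length then (pvBuckets rest).getD k [] else [])) = _
      rw [hlen, ih]
      have hrange : List.range (rest.length + 1 + 1) = 0 :: List.range' 1 (rest.length + 1) := by
        rw [List.range_eq_range', List.range'_succ]
      simp only [List.length_cons]
      rw [hrange]
      simp only [List.map_cons]
      congr 1
      · simp [List.range_eq_range', List.range'_succ, pvCombinations]
      · apply List.map_congr_left
        intro k hk
        rw [List.mem_range'_1] at hk
        obtain ⟨hk1, hk2⟩ := hk
        have hgetD : ∀ i, i < rest.length + 1 →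
            ((List.range (rest.length + 1)).map (fun r => pvCombinations r rest)).getD i [] =
              pvCombinations i rest := by
          intro i hi
          simp [List.getD, hi]
        cases k with
        | zero => omega
        | succ k =>
            have h1 : k < rest.length + 1 := by omega
            simp only [Nat.add_sub_cancel]
            rw [hgetD k h1]
            show _ = pvCombinations (k + 1) (p :: rest)
            simp only [pvCombinations]
            congr 1
            by_cases h2 : k + 1 < rest.length + 1
            · rw [if_pos (by simpa using h2), hgetD (k + 1) h2]
            · rw [if_neg (by simpa using h2)]
              exact (pvCombinations_eq_nil (by omega)).symm

theorem pvValidA_eq (conflicts : List (List String)) (c : List String) :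
    pvValidA conflicts c =
      !(conflicts.any (fun conf => conf.all (fun q => c.contains q))) := by
  induction conflicts with
  | nil => rfl
  | cons conf rest ih =>
      show (if conf.all (fun p => c.contains p) then false else pvValidA rest c) = _
      cases h : (conf.all fun p => c.contains p) with
      | true =>
          rw [if_pos rfl]
          simp only [List.any_cons]
          rw [h]
          simp
      | false =>
          rw [if_neg (by simp)]
          simp only [List.any_cons]
          rw [h, ih]
          simp

-- ===== VERDICT (by name: the statement is the Claim_ definition above) =====
theorem generate_valid_param_combinations_spec : Claim_equal_generate_valid_param_combinations := by
  intro params conflicts _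
  show generate_valid_param_combinations params conflicts = _
  unfold generate_valid_param_combinations generate_valid_param_combinations_alt
  rw [pvBuckets_eq]
  have hvalid : (fun c => pvValidA conflicts c) =
      (fun c => !(conflicts.any (fun conf => conf.all (fun q => c.contains q)))) := by
    funext c; exact pvValidA_eq conflicts c
  rw [hvalid]
  rw [List.filter_flatMap]
  simp [List.flatMap_map]
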